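-- pv_equiv track=rewrite | github.com/KurtChenkoyu/LexiCraft.XYZ | backend/src/morphological_miner.py | detect_suffix
-- ===== SOURCE A (Python) =====
-- from typing import Dict, List, Optional, Set, Tuple
--
-- COMMON_SUFFIXES = {
--     'ness', 'ly', 'tion', 'sion', 'ing', 'ed', 'er', 'est', 'ful', 'less',
--     'able', 'ible', 'al', 'ic', 'ical', 'ous', 'ious', 'ive', 'ment',
--     'ity', 'ty', 'ism', 'ist', 'ize', 'ise', 'fy', 'en', 'ify'
-- }
--
-- def detect_suffix(word1: str, word2: str) -> Optional[str]:
--     """Detect if word2 has a suffix added to word1."""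
--     word1_lower = word1.lower()
--     word2_lower = word2.lower()
--
--     # Check if word2 = word1 + suffix
--     for suffix in COMMON_SUFFIXES:
--         if word2_lower == word1_lower + suffix:
--             return suffix
--         # Also check if word2 ends with suffix and starts with word1
--         if word2_lower.endswith(suffix) and word2_lower[:-len(suffix)] == word1_lower:
--             return suffix
--
--     return None
-- ===== SOURCE B (Python) =====
-- COMMON_SUFFIXES = {
--     'ness', 'ly', 'tion', 'sion', 'ing', 'ed', 'er', 'est', 'ful', 'less',
--     'able', 'ible', 'al', 'ic', 'ical', 'ous', 'ious', 'ive', 'ment',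
--     'ity', 'ty', 'ism', 'ist', 'ize', 'ise', 'fy', 'en', 'ify'
-- }
--
-- def detect_suffix(word1: str, word2: str):
--     """Detect if word2 has a suffix added to word1 (direct slice + set lookup)."""
--     w1 = word1.lower()
--     w2 = word2.lower()
--     if not w2.startswith(w1):
--         return None
--     candidate = w2[len(w1):]
--     return candidate if candidate in COMMON_SUFFIXES else None
-- ===== Notes on version B (the rewrite author's own statement) =====
-- stated objective: simpler
-- what changed: Replaces the scan over all 28 suffixes (with two redundant checks per suffix) by a single startswith test, one slice computing the unique candidate suffix, and one set-membership lookup.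
import Mathlib
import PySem

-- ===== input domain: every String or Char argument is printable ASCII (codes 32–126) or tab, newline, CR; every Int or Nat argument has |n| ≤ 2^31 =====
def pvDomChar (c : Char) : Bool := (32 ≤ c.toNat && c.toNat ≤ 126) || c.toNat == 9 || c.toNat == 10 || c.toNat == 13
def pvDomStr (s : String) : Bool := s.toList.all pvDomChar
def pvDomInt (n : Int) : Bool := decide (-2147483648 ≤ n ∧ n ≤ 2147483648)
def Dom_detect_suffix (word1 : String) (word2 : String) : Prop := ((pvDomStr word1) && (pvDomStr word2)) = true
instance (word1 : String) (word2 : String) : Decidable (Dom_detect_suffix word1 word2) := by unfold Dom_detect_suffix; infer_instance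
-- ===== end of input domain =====

-- B drops A's loop over the 28 suffixes: one startswith test, one slice, one set lookup (simpler).

-- ===== PORT A =====
-- COMMON_SUFFIXES as a PySem.Set (source literal order; A's for-loop result is
-- order-independent since at most one suffix can satisfy w2 = w1 + suffix — proved below).
def pvSuffixes : PySem.Set (List Char) := PySem.Set.ofList
  ["ness".toList, "ly".toList, "tion".toList, "sion".toList, "ing".toList, "ed".toList,
   "er".toList, "est".toList, "ful".toList, "less".toList, "able".toList, "ible".toList,
   "al".toList, "ic".toList, "ical".toList, "ous".toList, "ious".toList, "ive".toList,
   "ment".toList, "ity".toList, "ty".toList, "ism".toList, "ist".toList, "ize".toList,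
   "ise".toList, "fy".toList, "en".toList, "ify".toList]

-- A's for-loop over the suffixes, first-hit return
def pvLoopA (w1 w2 : List Char) : List (List Char) → Option String
  | [] => none
  | s :: rest =>
    if w2 = w1 ++ s then some (String.ofList s)
    else if PySem.Chars.endswith w2 s && (PySem.List.slice w2 none (some (-(s.length : Int))) == w1)
      then some (String.ofList s)
    else pvLoopA w1 w2 rest

def detect_suffix (word1 : String) (word2 : String) : Option String :=
  let word1_lower := PySem.Chars.lower word1.toList
  let word2_lower := PySem.Chars.lower word2.toList
  pvLoopA word1_lower word2_lower pvSuffixes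

-- ===== PORT B =====
def detect_suffix_alt (word1 : String) (word2 : String) : Option String :=
  let w1 := PySem.Chars.lower word1.toList
  let w2 := PySem.Chars.lower word2.toList
  if !(PySem.Chars.startswith w2 w1) then none
  else
    let candidate := PySem.List.slice w2 (some (w1.length : Int)) none
    if PySem.Set.contains pvSuffixes candidate then some (String.ofList candidate) else none

-- ===== PRECONDITION & SPEC =====
def Spec_detect_suffix (word1 : String) (word2 : String) (out : Option String) : Prop := out = detect_suffix_alt word1 word2
instance (word1 : String) (word2 : String) (out : Option String) : Decidable (Spec_detect_suffix word1 word2 out) := by unfold Spec_detect_suffix; infer_instance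

-- ===== CLAIM (what is proved, stated in full; the proofs are below) =====
def Claim_equal_detect_suffix : Prop := ∀ (word1 : String) (word2 : String), Dom_detect_suffix word1 word2 → Spec_detect_suffix word1 word2 (detect_suffix word1 word2)

-- ===== LEMMAS AND PROOFS =====

-- the negative slice w2[:-len(s)] of w2 = t ++ s is t (s nonempty)
lemma pv_slice_neg (t s : List Char) (hs : s ≠ []) :
    PySem.List.slice (t ++ s) none (some (-(s.length : Int))) = t := by
  have hpos : 0 < s.length := List.length_pos_iff.mpr hs
  simp [PySem.List.slice, PySem.List.clampIdx]
  split_ifs with h1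
  · exact absurd h1 (by omega)
  · exact List.take_left

-- A's second check (endswith + negative slice) is equivalent to w2 = w1 ++ s, for nonempty s
lemma pv_second_check (w1 w2 s : List Char) (hs : s ≠ []) :
    (PySem.Chars.endswith w2 s && (PySem.List.slice w2 none (some (-(s.length : Int))) == w1)) = true
      ↔ w2 = w1 ++ s := by
  rw [Bool.and_eq_true, beq_iff_eq, PySem.Chars.endswith_iff]
  constructor
  · rintro ⟨⟨t, rfl⟩, hsl⟩
    rw [pv_slice_neg t s hs] at hsl
    rw [hsl]
  · rintro rfl
    exact ⟨⟨w1, rfl⟩, pv_slice_neg w1 s hs⟩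

-- w2 = w1 ++ s pins s down to the drop past w1
lemma pv_eq_append_iff (w1 w2 s : List Char) :
    w2 = w1 ++ s ↔ (w1.isPrefixOf w2 ∧ s = w2.drop w1.length) := by
  rw [List.isPrefixOf_iff_prefix]
  constructor
  · rintro rfl; exact ⟨⟨s, rfl⟩, by simp⟩
  · rintro ⟨⟨t, rfl⟩, hs⟩; simp at hs; rw [hs]

-- characterisation of A's loop: it returns the drop past w1 iff that drop is a listed suffix
lemma pv_loopA_eq (w1 w2 : List Char) (L : List (List Char)) (hL : ∀ s ∈ L, s ≠ []) :
    pvLoopA w1 w2 L =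
      if w1.isPrefixOf w2 ∧ (w2.drop w1.length) ∈ L
        then some (String.ofList (w2.drop w1.length)) else none := by
  induction L with
  | nil => simp [pvLoopA]
  | cons s rest ih =>
    have hs : s ≠ [] := hL s (List.mem_cons_self ..)
    rw [pvLoopA]
    by_cases h : w2 = w1 ++ s
    · obtain ⟨hp, hd⟩ := (pv_eq_append_iff w1 w2 s).mp h
      rw [if_pos h, if_pos ⟨hp, hd ▸ List.mem_cons_self ..⟩, ← hd]
    · rw [if_neg h, if_neg (fun hc => h ((pv_second_check w1 w2 s hs).mp hc)),
        ih (fun t ht => hL t (List.mem_cons_of_mem _ ht))]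
      congr 1
      simp only [eq_iff_iff]
      constructor
      · rintro ⟨hp, hm⟩
        exact ⟨hp, List.mem_cons_of_mem _ hm⟩
      · rintro ⟨hp, hm⟩
        rcases List.mem_cons.mp hm with h1 | h1
        · exact absurd ((pv_eq_append_iff w1 w2 s).mpr ⟨hp, h1.symm⟩) h
        · exact ⟨hp, h1⟩

lemma pv_suffixes_ne_nil : ∀ s ∈ (pvSuffixes : List (List Char)), s ≠ [] := by decide

-- ===== VERDICT (by name: the statement is the Claim_ definition above) =====
theorem detect_suffix_spec : Claim_equal_detect_suffix := by
  intro word1 word2 _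
  unfold Spec_detect_suffix detect_suffix detect_suffix_alt
  simp only [pv_loopA_eq _ _ _ pv_suffixes_ne_nil]
  set w1 := PySem.Chars.lower word1.toList
  set w2 := PySem.Chars.lower word2.toList
  rw [PySem.List.slice_from (xs := w2) (a := (w1.length : Int)) (Int.natCast_nonneg _)]
  simp only [Int.toNat_natCast]
  by_cases hp : w1 <+: w2
  · have hA : w1.isPrefixOf w2 = true := List.isPrefixOf_iff_prefix.mpr hp
    have hB : PySem.Chars.startswith w2 w1 = true := (PySem.Chars.startswith_iff w2 w1).mpr hp
    simp only [hA, hB, Bool.not_true, Bool.false_eq_true, if_false, true_and]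
    by_cases hm : (w2.drop w1.length) ∈ (pvSuffixes : List (List Char))
    · rw [if_pos hm, if_pos (by simpa [PySem.Set.contains_iff] using hm)]
    · rw [if_neg hm, if_neg (by simpa [PySem.Set.contains_iff] using hm)]
  · simp [hp, List.isPrefixOf_iff_prefix, PySem.Chars.startswith_iff]
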